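-- pv_equiv track=rewrite | github.com/AltheD/CodeAgent | api/bug_detection_api.py | generate_fix_recommendations
-- ===== SOURCE A (Python) =====
-- def generate_fix_recommendations(issues):
--     """生成修复建议"""
--     recommendations = {
--         "immediate_actions": [],
--         "short_term_improvements": [],
--         "long_term_optimizations": []
--     }
--
--     error_count = sum(1 for issue in issues if issue.get("severity") == "error")
--     warning_count = sum(1 for issue in issues if issue.get("severity") == "warning")
--
--     # 立即行动
--     if error_count > 0:
--         recommendations["immediate_actions"].append(f"修复 {error_count} 个错误级别的问题")
--
--     # 安全相关问题
--     security_issues = [issue for issue in issues if "security" in issue.get("type", "").lower()]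
--     if security_issues:
--         recommendations["immediate_actions"].append(f"优先处理 {len(security_issues)} 个安全问题")
--
--     # 短期改进
--     if warning_count > 10:
--         recommendations["short_term_improvements"].append("进行代码审查，处理大量警告")
--
--     # 长期优化
--     recommendations["long_term_optimizations"].append("建立持续集成流程，定期进行代码质量检查")
--     recommendations["long_term_optimizations"].append("制定代码规范和最佳实践指南")
--
--     return recommendations
-- ===== SOURCE B (Python) =====
-- def generate_fix_recommendations(issues):
--     """生成修复建议 (single-pass tally)"""
--     error_count = warning_count = security_count = 0
--     for issue in issues:
--         if "security" in issue.get("type", "").lower():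
--             security_count += 1
--         sev = issue.get("severity")
--         if sev == "error":
--             error_count += 1
--         elif sev == "warning":
--             warning_count += 1
--     immediate = []
--     if error_count > 0:
--         immediate.append(f"修复 {error_count} 个错误级别的问题")
--     if security_count > 0:
--         immediate.append(f"优先处理 {security_count} 个安全问题")
--     return {
--         "immediate_actions": immediate,
--         "short_term_improvements": ["进行代码审查，处理大量警告"] if warning_count > 10 else [],
--         "long_term_optimizations": [
--             "建立持续集成流程，定期进行代码质量检查",
--             "制定代码规范和最佳实践指南",
--         ],
--     }
-- ===== Notes on version B (the rewrite author's own statement) =====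
-- stated objective: alternative
-- what changed: One single pass over issues tallies error/warning/security counts in three counters (replacing A's two sum-comprehensions and a filter list), and the result dict is built directly as a literal instead of by appending into a pre-built dict of empty lists.
import Mathlib
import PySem

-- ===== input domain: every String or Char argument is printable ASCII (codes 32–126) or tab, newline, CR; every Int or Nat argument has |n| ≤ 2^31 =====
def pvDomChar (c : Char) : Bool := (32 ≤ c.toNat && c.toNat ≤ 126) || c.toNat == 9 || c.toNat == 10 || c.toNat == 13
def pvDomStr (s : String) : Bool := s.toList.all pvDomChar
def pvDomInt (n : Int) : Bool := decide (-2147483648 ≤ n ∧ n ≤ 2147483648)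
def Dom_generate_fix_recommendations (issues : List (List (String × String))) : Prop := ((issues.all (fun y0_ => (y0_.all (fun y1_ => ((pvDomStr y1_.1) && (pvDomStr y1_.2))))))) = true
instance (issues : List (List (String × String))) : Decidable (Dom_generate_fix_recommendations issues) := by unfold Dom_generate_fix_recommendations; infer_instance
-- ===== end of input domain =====

-- B fuses A's two sum-comprehensions and the security filter into one loop with three counters
-- and builds the result dict directly as a literal (alternative decomposition, same cost class).

-- ===== PORT A =====
def generate_fix_recommendations (issues : List (List (String × String))) : List (String × List String) :=
  let recommendations : PySem.Dict String (List String) :=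
    (((PySem.Dict.empty.insert "immediate_actions" []).insert "short_term_improvements" []).insert "long_term_optimizations" [])
  let error_count : Int :=
    issues.foldl (fun acc issue => if (PySem.Dict.mk issue).get? "severity" == some "error" then acc + 1 else acc) 0
  let warning_count : Int :=
    issues.foldl (fun acc issue => if (PySem.Dict.mk issue).get? "severity" == some "warning" then acc + 1 else acc) 0
  let recommendations :=
    if error_count > 0 then
      recommendations.modify "immediate_actions" [] (· ++ ["修复 " ++ PySem.Int.toStr error_count ++ " 个错误级别的问题"])
    else recommendations
  let security_issues :=
    issues.filter (fun issue => PySem.Str.isIn "security" (PySem.Str.lower ((PySem.Dict.mk issue).getD "type" "")))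
  let recommendations :=
    if security_issues.length > 0 then
      recommendations.modify "immediate_actions" [] (· ++ ["优先处理 " ++ PySem.Int.toStr (security_issues.length : Int) ++ " 个安全问题"])
    else recommendations
  let recommendations :=
    if warning_count > 10 then
      recommendations.modify "short_term_improvements" [] (· ++ ["进行代码审查，处理大量警告"])
    else recommendations
  let recommendations := recommendations.modify "long_term_optimizations" [] (· ++ ["建立持续集成流程，定期进行代码质量检查"])
  let recommendations := recommendations.modify "long_term_optimizations" [] (· ++ ["制定代码规范和最佳实践指南"])
  recommendations.items

-- ===== PORT B =====
def generate_fix_recommendations_alt (issues : List (List (String × String))) : List (String × List String) :=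
  let c : Int × Int × Int :=
    issues.foldl (fun c issue =>
      let d := PySem.Dict.mk issue
      let s := if PySem.Str.isIn "security" (PySem.Str.lower (d.getD "type" "")) then c.2.2 + 1 else c.2.2
      let sev := d.get? "severity"
      if sev == some "error" then (c.1 + 1, c.2.1, s)
      else if sev == some "warning" then (c.1, c.2.1 + 1, s)
      else (c.1, c.2.1, s)) (0, 0, 0)
  let immediate : List String :=
    (if c.1 > 0 then ["修复 " ++ PySem.Int.toStr c.1 ++ " 个错误级别的问题"] else []) ++
    (if c.2.2 > 0 then ["优先处理 " ++ PySem.Int.toStr c.2.2 ++ " 个安全问题"] else [])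
  [("immediate_actions", immediate),
   ("short_term_improvements", if c.2.1 > 10 then ["进行代码审查，处理大量警告"] else []),
   ("long_term_optimizations", ["建立持续集成流程，定期进行代码质量检查", "制定代码规范和最佳实践指南"])]

-- ===== PRECONDITION & SPEC =====
def Spec_generate_fix_recommendations (issues : List (List (String × String))) (out : List (String × List String)) : Prop := out = generate_fix_recommendations_alt issues
instance (issues : List (List (String × String))) (out : List (String × List String)) : Decidable (Spec_generate_fix_recommendations issues out) := by unfold Spec_generate_fix_recommendations; infer_instance

-- ===== CLAIM (what is proved, stated in full; the proofs are below) =====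
def Claim_equal_generate_fix_recommendations : Prop := ∀ (issues : List (List (String × String))), Dom_generate_fix_recommendations issues → Spec_generate_fix_recommendations issues (generate_fix_recommendations issues)

-- ===== LEMMAS AND PROOFS =====

-- B's fused loop computes the three counts A computes by separate passes.
theorem fold_counts (issues : List (List (String × String))) (e w s : Int) :
    issues.foldl (fun c issue =>
      let d := PySem.Dict.mk issue
      let s := if PySem.Str.isIn "security" (PySem.Str.lower (d.getD "type" "")) then c.2.2 + 1 else c.2.2
      let sev := d.get? "severity"
      if sev == some "error" then (c.1 + 1, c.2.1, s)
      else if sev == some "warning" then (c.1, c.2.1 + 1, s)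
      else (c.1, c.2.1, s)) (e, w, s) =
    (e + (issues.countP (fun issue => (PySem.Dict.mk issue).get? "severity" == some "error") : Int),
     w + (issues.countP (fun issue => (PySem.Dict.mk issue).get? "severity" == some "warning") : Int),
     s + (issues.countP (fun issue => PySem.Str.isIn "security" (PySem.Str.lower ((PySem.Dict.mk issue).getD "type" ""))) : Int)) := by
  induction issues generalizing e w s with
  | nil => simp
  | cons x xs ih =>
    simp only [List.foldl_cons, List.countP_cons]
    by_cases hsec : PySem.Str.isIn "security" (PySem.Str.lower ((PySem.Dict.mk x).getD "type" "")) = true <;>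
    by_cases hE : ((PySem.Dict.mk x).get? "severity" == some "error") = true <;>
    by_cases hW : ((PySem.Dict.mk x).get? "severity" == some "warning") = true <;>
    (try simp_all)
    all_goals try refine ⟨?_, ?_⟩
    all_goals ring

theorem counts_lemma_A_error (issues : List (List (String × String))) :
    issues.foldl (fun acc issue => if (PySem.Dict.mk issue).get? "severity" == some "error" then acc + 1 else acc) (0 : Int)
      = (issues.countP (fun issue => (PySem.Dict.mk issue).get? "severity" == some "error") : Int) := by
  simpa using PySem.List.foldl_if_add_one (fun issue => (PySem.Dict.mk issue).get? "severity" == some "error") issues 0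

theorem counts_lemma_A_warning (issues : List (List (String × String))) :
    issues.foldl (fun acc issue => if (PySem.Dict.mk issue).get? "severity" == some "warning" then acc + 1 else acc) (0 : Int)
      = (issues.countP (fun issue => (PySem.Dict.mk issue).get? "severity" == some "warning") : Int) := by
  simpa using PySem.List.foldl_if_add_one (fun issue => (PySem.Dict.mk issue).get? "severity" == some "warning") issues 0

-- ===== VERDICT (by name: the statement is the Claim_ definition above) =====
theorem generate_fix_recommendations_spec : Claim_equal_generate_fix_recommendations := by
  intro issues _
  unfold Spec_generate_fix_recommendations generate_fix_recommendations generate_fix_recommendations_alt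
  simp only [fold_counts, counts_lemma_A_error, counts_lemma_A_warning, ← List.countP_eq_length_filter]
  have hsec : ((0:Nat) < issues.countP (fun issue => PySem.Str.isIn "security" (PySem.Str.lower ((PySem.Dict.mk issue).getD "type" "")))) ↔ ((0:Int) < (issues.countP (fun issue => PySem.Str.isIn "security" (PySem.Str.lower ((PySem.Dict.mk issue).getD "type" ""))) : Int)) := by
    omega
  simp only [gt_iff_lt, hsec, zero_add]
  split_ifs <;> rfl
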